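-- pv_equiv track=rewrite | github.com/jepuli124/DataSturcturesAndAlgorithms | week7/7.3B.py | firstLevel2
-- ===== SOURCE A (Python) =====
-- def firstLevel2(n):
--     boards = []
--     for places in range((n//2)*n):
--         xPos = places % (n//2)
--         yPos = places // (n//2)
--         board = []
--         board.append((xPos, yPos))
--         boards.append(board)
--     return boards
-- ===== SOURCE B (Python) =====
-- def firstLevel2(n):
--     # Staged row construction: build the y=0 row of single-cell boards once,
--     # then derive each next row from the previous by shifting the y-coordinate.
--     row = [[(x, 0)] for x in range(n // 2)]
--     boards = []
--     for _ in range(n):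
--         boards += row
--         row = [[(x, y + 1)] for [(x, y)] in row]
--     return boards
-- ===== Notes on version B (the rewrite author's own statement) =====
-- stated objective: alternative
-- what changed: Instead of one flat loop recovering each cell's coordinates with % and //, B builds the y=0 row of single-cell boards once and then derives each subsequent row from the previous one by shifting the y-coordinate, concatenating the rows; no per-cell coordinate arithmetic remains.
-- intended difference: For negative n, A's floor division makes (n//2)*n positive and A returns garbage boards with negative coordinates, while B returns the empty list, the intended value for a negative board size. — e.g. on firstLevel2(-1): A returns [[(0, 0)]], B returns []
import Mathlib
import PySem

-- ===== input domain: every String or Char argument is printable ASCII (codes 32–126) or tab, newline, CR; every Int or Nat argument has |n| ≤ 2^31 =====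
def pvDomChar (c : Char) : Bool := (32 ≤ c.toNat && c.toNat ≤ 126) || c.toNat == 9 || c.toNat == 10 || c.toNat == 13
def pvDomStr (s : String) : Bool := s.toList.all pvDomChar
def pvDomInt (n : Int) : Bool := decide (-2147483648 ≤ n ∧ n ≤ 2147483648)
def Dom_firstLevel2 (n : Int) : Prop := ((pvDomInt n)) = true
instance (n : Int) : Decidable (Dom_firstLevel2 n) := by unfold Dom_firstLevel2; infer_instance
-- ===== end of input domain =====

-- B replaces A's flat divmod loop by staged row construction: the y=0 row of boards is built
-- once and each later row is derived from the previous one by shifting the y-coordinate;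
-- on negative n the behaviours differ intentionally, see D_firstLevel2 below.

-- ===== PORT A =====
def firstLevel2 (n : Int) : List (List (Int × Int)) :=
  (PySem.List.pyRange 0 (PySem.Int.floordiv n 2 * n) 1).foldl
    (fun boards places =>
      let xPos := PySem.Int.mod places (PySem.Int.floordiv n 2)
      let yPos := PySem.Int.floordiv places (PySem.Int.floordiv n 2)
      let board : List (Int × Int) := [] ++ [(xPos, yPos)]
      boards ++ [board]) []

-- ===== PORT B =====
-- The comprehension '[(x, y + 1)] for [(x, y)] in row' destructures each board; every board in
-- row is a one-element list, so the wildcard branch of the Lean match is never reached.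
def firstLevel2_alt (n : Int) : List (List (Int × Int)) :=
  let row0 : List (List (Int × Int)) :=
    (PySem.List.pyRange 0 (PySem.Int.floordiv n 2) 1).map (fun x => [(x, (0 : Int))])
  let st :=
    (PySem.List.pyRange 0 n 1).foldl
      (fun (st : List (List (Int × Int)) × List (List (Int × Int))) _ =>
        (st.1 ++ st.2,
         st.2.map (fun b => match b with
           | [(x, y)] => [(x, y + 1)]
           | _ => [])))
      (([] : List (List (Int × Int))), row0)
  st.1

-- ===== PRECONDITION & SPEC =====
-- For negative n, A's floor division makes (n//2)*n positive and A returns garbage boards with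
-- negative coordinates, while B returns [], the intended value for a negative board size.
def D_firstLevel2 (n : Int) : Prop := n < 0
instance (n : Int) : Decidable (D_firstLevel2 n) := by unfold D_firstLevel2; infer_instance
def Spec_firstLevel2 (n : Int) (out : List (List (Int × Int))) : Prop := ¬ D_firstLevel2 n → out = firstLevel2_alt n
instance (n : Int) (out : List (List (Int × Int))) : Decidable (Spec_firstLevel2 n out) := by unfold Spec_firstLevel2; infer_instance
def pvDiffWitness_firstLevel2 : Int := (-1)
def pvDiffWitnessOut_firstLevel2 : (List (List (Int × Int))) × (List (List (Int × Int))) := ([[(0, 0)]], [])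

-- ===== CLAIM =====
def Claim_unchanged_firstLevel2 : Prop := ∀ (n : Int), Dom_firstLevel2 n → Spec_firstLevel2 n (firstLevel2 n)
def Claim_changed_firstLevel2 : Prop := Dom_firstLevel2 (pvDiffWitness_firstLevel2) ∧ D_firstLevel2 (pvDiffWitness_firstLevel2) ∧ firstLevel2 (pvDiffWitness_firstLevel2) = pvDiffWitnessOut_firstLevel2.1 ∧ firstLevel2_alt (pvDiffWitness_firstLevel2) = pvDiffWitnessOut_firstLevel2.2 ∧ pvDiffWitnessOut_firstLevel2.1 ≠ pvDiffWitnessOut_firstLevel2.2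
def Claim_exact_firstLevel2 : Prop := ∀ (n : Int), Dom_firstLevel2 n → D_firstLevel2 n → firstLevel2 n ≠ firstLevel2_alt n

-- ===== LEMMAS AND PROOFS =====

-- the row of single-cell boards at height y
def pvRow (m : Nat) (y : Int) : List (List (Int × Int)) :=
  (List.range m).map (fun x => [(((x : Nat) : Int), y)])

theorem pv_shift (m : Nat) (y : Int) :
    (pvRow m y).map (fun b => match b with
      | [(x, y)] => [(x, y + 1)]
      | _ => ([] : List (Int × Int))) = pvRow m (y + 1) := by
  unfold pvRow
  rw [List.map_map]
  rfl

-- loop invariant of B: folding the row-shift step over any list of length k, starting from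
-- (acc, pvRow m y0), appends rows y0 … y0+k-1 and leaves pvRow m (y0+k) as the current row.
theorem pv_inv (m : Nat) : ∀ (l : List Int) (acc : List (List (Int × Int))) (y0 : Int),
    l.foldl
      (fun (st : List (List (Int × Int)) × List (List (Int × Int))) _ =>
        (st.1 ++ st.2,
         st.2.map (fun b => match b with
           | [(x, y)] => [(x, y + 1)]
           | _ => [])))
      (acc, pvRow m y0)
    = (acc ++ (List.range l.length).flatMap (fun j : Nat => pvRow m (y0 + (j : Int))),
       pvRow m (y0 + (l.length : Int))) := by
  intro l
  induction l with
  | nil => intro acc y0; simp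
  | cons a l ih =>
    intro acc y0
    simp only [List.foldl_cons, pv_shift, ih (acc ++ pvRow m y0) (y0 + 1), List.length_cons,
      Prod.mk.injEq]
    constructor
    · rw [List.append_assoc]
      congr 1
      rw [List.range_succ_eq_map, List.flatMap_cons, List.flatMap_map]
      congr 1
      · simp
      · apply List.flatMap_congr
        intro j _
        congr 1; push_cast; ring
    · congr 1; push_cast; ring

theorem pv_core (M N : Nat) :
    (List.range (M * N)).map (fun p => [(((p % M : Nat) : Int), ((p / M : Nat) : Int))]) =
    (List.range N).flatMap (fun y => (List.map (fun x => [(((x : Nat) : Int), ((y : Nat) : Int))]) (List.range M))) := by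
  induction N with
  | zero => simp
  | succ N ih =>
    rw [Nat.mul_succ, List.range_add, List.map_append, ih, List.range_succ,
      List.flatMap_append, List.map_map]
    congr 1
    simp only [List.flatMap_cons, List.flatMap_nil, List.append_nil]
    apply List.map_congr_left
    intro j hj
    simp only [List.mem_range] at hj
    have hM : 0 < M := Nat.lt_of_le_of_lt (Nat.zero_le j) hj
    have h1 : (M * N + j) % M = j := by
      rw [Nat.add_comm, Nat.add_mul_mod_self_left, Nat.mod_eq_of_lt hj]
    have h2 : (M * N + j) / M = N := by
      rw [Nat.add_comm, Nat.add_mul_div_left _ _ hM, Nat.div_eq_of_lt hj, Nat.zero_add]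
    simp [Function.comp, h1, h2]

theorem pv_main (N : Nat) : firstLevel2 (N : Int) = firstLevel2_alt (N : Int) := by
  have hm : PySem.Int.floordiv (N : Int) 2 = ((N / 2 : Nat) : Int) := by
    exact_mod_cast PySem.Int.floordiv_natCast N 2
  have hA : firstLevel2 (N : Int) =
      (List.range (N / 2 * N)).map (fun p => [(((p % (N / 2) : Nat) : Int), ((p / (N / 2) : Nat) : Int))]) := by
    unfold firstLevel2
    rw [PySem.List.foldl_append_singleton_eq_map
      (f := fun places => [] ++ [(PySem.Int.mod places (PySem.Int.floordiv (N : Int) 2),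
        PySem.Int.floordiv places (PySem.Int.floordiv (N : Int) 2))])]
    rw [List.nil_append, hm]
    have : ((N / 2 : Nat) : Int) * (N : Int) = ((N / 2 * N : Nat) : Int) := by push_cast; ring
    rw [this, PySem.List.pyRange_zero_natCast, List.map_map]
    simp only [Function.comp_def, List.nil_append, PySem.Int.mod_natCast, PySem.Int.floordiv_natCast]
  have hrow0 : (PySem.List.pyRange 0 (PySem.Int.floordiv (N : Int) 2) 1).map
      (fun x => [(x, (0 : Int))]) = pvRow (N / 2) 0 := by
    rw [hm, PySem.List.pyRange_zero_natCast, List.map_map]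
    rfl
  have hB : firstLevel2_alt (N : Int) =
      (List.range N).flatMap (fun y => (List.range (N / 2)).map
        (fun x => [(((x : Nat) : Int), ((y : Nat) : Int))])) := by
    unfold firstLevel2_alt
    simp only [hrow0]
    rw [pv_inv (N / 2) (PySem.List.pyRange 0 (N : Int) 1) [] 0]
    simp only [List.nil_append]
    rw [PySem.List.pyRange_zero_natCast, List.length_map, List.length_range]
    apply List.flatMap_congr
    intro j hj
    simp only [Int.zero_add]
    rfl
  rw [hA, hB, pv_core]

theorem pv_alt_neg (n : Int) (hn : n < 0) : firstLevel2_alt n = [] := by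
  unfold firstLevel2_alt
  rw [PySem.List.pyRange_one_eq_nil (a := 0) (b := n) (by omega)]
  rfl

theorem pv_a_len (n : Int) : (firstLevel2 n).length = (PySem.Int.floordiv n 2 * n).toNat := by
  unfold firstLevel2
  rw [PySem.List.foldl_append_singleton_eq_map
    (f := fun places => [] ++ [(PySem.Int.mod places (PySem.Int.floordiv n 2),
      PySem.Int.floordiv places (PySem.Int.floordiv n 2))])]
  rw [List.nil_append, List.length_map, PySem.List.length_pyRange_one]
  simp

-- ===== VERDICT =====
theorem firstLevel2_spec : Claim_unchanged_firstLevel2 := by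
  intro n _
  unfold Spec_firstLevel2 D_firstLevel2
  intro hnd
  obtain ⟨N, rfl⟩ : ∃ N : Nat, n = (N : Int) := ⟨n.toNat, (Int.toNat_of_nonneg (by omega)).symm⟩
  exact pv_main N

theorem firstLevel2_changed : Claim_changed_firstLevel2 := by
  unfold Claim_changed_firstLevel2; decide

theorem firstLevel2_tight : Claim_exact_firstLevel2 := by
  intro n _ hd h
  unfold D_firstLevel2 at hd
  have hm : PySem.Int.floordiv n 2 = n / 2 := PySem.Int.floordiv_eq_ediv_of_pos (by norm_num)
  have hmn : 0 < n / 2 * n := mul_pos_of_neg_of_neg (by omega) hd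
  have hlen := pv_a_len n
  rw [h, pv_alt_neg n hd, hm] at hlen
  simp only [List.length_nil] at hlen
  have := Int.toNat_of_nonneg (le_of_lt hmn)
  omega
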